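-- pv_equiv track=rewrite | github.com/DGKwak/Programers | 프로세스(Lv2).py | solution
-- ===== SOURCE A (Python) =====
-- def solution(pri, loc):
--     ans = []
--     qu = [x for x in range(len(pri))]
--
--     while qu:
--         tmp = qu.pop(0)
--
--         if any(pri[tmp] < pri[x] for x in qu):
--             qu.append(tmp)
--         else:
--             ans.append(tmp)
--             pri[tmp] = 0
--
--     return ans.index(loc)+1
--
-- pri = [2, 1, 3, 2]
--
-- loc = 2
-- ===== SOURCE B (Python) =====
-- def solution(pri, loc):
--     # Return-value equivalent to A; unlike A it does not mutate pri.
--     qu = list(range(len(pri)))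
--     ans = []
--     while qu:
--         vals = [pri[i] for i in qu]
--         k = vals.index(max(vals))
--         ans.append(qu[k])
--         qu = qu[k+1:] + qu[:k]
--     return ans.index(loc) + 1
-- ===== Notes on version B (the rewrite author's own statement) =====
-- stated objective: faster
-- what changed: Instead of rotating the queue one element at a time with a full any()-scan per rotation, B jumps straight to the first maximal element of the queue each round and splices the queue around it, so each executed process costs one O(n) pass instead of up to n rotations each with an O(n) scan.
import Mathlib
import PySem

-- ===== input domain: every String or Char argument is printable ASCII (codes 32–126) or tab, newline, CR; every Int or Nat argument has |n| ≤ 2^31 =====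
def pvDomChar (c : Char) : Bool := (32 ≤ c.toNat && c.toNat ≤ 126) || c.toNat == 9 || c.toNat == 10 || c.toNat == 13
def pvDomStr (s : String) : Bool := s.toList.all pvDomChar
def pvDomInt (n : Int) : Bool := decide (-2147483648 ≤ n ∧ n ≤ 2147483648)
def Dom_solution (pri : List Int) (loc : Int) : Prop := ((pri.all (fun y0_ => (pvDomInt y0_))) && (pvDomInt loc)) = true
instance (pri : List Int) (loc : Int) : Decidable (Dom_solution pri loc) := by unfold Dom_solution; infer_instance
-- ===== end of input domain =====

-- B replaces A's one-step queue rotations (each guarded by a full any()-scan) with a direct jump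
-- to the first maximal queue element plus a splice; equivalence is about the RETURN value only
-- (A mutates its pri argument in place, B does not).


-- ===== PORT A =====
-- A's while loop; the fuel argument is only a totality guard (n*n+1 steps always suffice,
-- proved below in loopA_eq_orderB/phi_le). pri[tmp] / pri[x] reads are pyGetD (the indices are
-- queue members, always in range, so the default is never consulted); pri[tmp] = 0 is pySetD
-- (exact for the in-range tmp).
def solutionLoopA : Nat → List Int → List Int → List Int → List Int
  | 0, _, _, ans => ans
  | _ + 1, _, [], ans => ans
  | fuel + 1, pri, tmp :: rest, ans =>
    if rest.any (fun x => PySem.List.pyGetD pri tmp 0 < PySem.List.pyGetD pri x 0) then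
      solutionLoopA fuel pri (rest ++ [tmp]) ans
    else
      solutionLoopA fuel (PySem.List.pySetD pri tmp 0) rest (ans ++ [tmp])

def solution (pri : List Int) (loc : Int) : Int :=
  let qu := PySem.List.pyRange 0 (pri.length : Int) 1
  let ans := solutionLoopA (pri.length * pri.length + 1) pri qu []
  match PySem.List.index? ans loc with
  | some i => (i : Int) + 1
  | none => 0   -- unreachable under Pre_solution (Python raises ValueError there)

-- ===== PORT B =====
-- B's while loop; the fuel argument is only a totality guard (the loop pops one element per
-- iteration, so len(qu) steps suffice exactly). max(vals) is PySem.List.max?, vals.index is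
-- PySem.List.index?; the slices qu[k+1:] / qu[:k] are drop (k+1) / take k, exact for the
-- in-range Nat k (PySem.List.slice_from_natCast / slice_to_natCast); qu[k] is pyGetD at the
-- in-range k.
def solutionOrderB : Nat → List Int → List Int → List Int
  | 0, _, _ => []
  | _ + 1, _, [] => []
  | fuel + 1, pri, tmp :: rest =>
    let qu := tmp :: rest
    let vals := qu.map (fun i => PySem.List.pyGetD pri i 0)
    match PySem.List.max? vals (fun v => v) with
    | none => []   -- unreachable: vals is nonempty
    | some m =>
      match PySem.List.index? vals m with
      | none => []   -- unreachable: m is a member of vals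
      | some k => PySem.List.pyGetD qu (k : Int) 0 :: solutionOrderB fuel pri (qu.drop (k + 1) ++ qu.take k)

def solution_alt (pri : List Int) (loc : Int) : Int :=
  let qu := PySem.List.pyRange 0 (pri.length : Int) 1
  let ans := solutionOrderB qu.length pri qu
  match PySem.List.index? ans loc with
  | some i => (i : Int) + 1
  | none => 0   -- unreachable under Pre_solution (Python raises ValueError there)

-- ===== PRECONDITION & SPEC =====
-- Pre_ excludes exactly the inputs on which the Python A raises: ans is a permutation of
-- range(len(pri)), so ans.index(loc) raises ValueError unless 0 ≤ loc < len(pri).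
def Pre_solution (pri : List Int) (loc : Int) : Prop := 0 ≤ loc ∧ loc < (pri.length : Int)
instance (pri : List Int) (loc : Int) : Decidable (Pre_solution pri loc) := by unfold Pre_solution; infer_instance
def pvWitness_solution : List Int × Int := ([2, 1, 3, 2], 2)

def Spec_solution (pri : List Int) (loc : Int) (out : Int) : Prop := out = solution_alt pri loc
instance (pri : List Int) (loc : Int) (out : Int) : Decidable (Spec_solution pri loc out) := by unfold Spec_solution; infer_instance

-- ===== CLAIM (what is proved, stated in full; the proofs are below) =====
def Claim_equal_solution : Prop := ∀ (pri : List Int) (loc : Int), Dom_solution pri loc → Pre_solution pri loc → Spec_solution pri loc (solution pri loc)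

-- ===== LEMMAS AND PROOFS =====

-- number of iterations A's loop performs from queue qu (mirrors solutionOrderB's recursion)
def solutionPhi : Nat → List Int → List Int → Nat
  | 0, _, _ => 0
  | _ + 1, _, [] => 0
  | fuel + 1, pri, tmp :: rest =>
    let qu := tmp :: rest
    let vals := qu.map (fun i => PySem.List.pyGetD pri i 0)
    match PySem.List.max? vals (fun v => v) with
    | none => 0
    | some m =>
      match PySem.List.index? vals m with
      | none => 0
      | some k => (k + 1) + solutionPhi fuel pri (qu.drop (k + 1) ++ qu.take k)

-- the value list of a nonempty queue has a first maximum at an in-range position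
lemma solution_key (pri : List Int) (tmp : Int) (rest : List Int) :
    ∃ m k, PySem.List.max? ((tmp :: rest).map (fun i => PySem.List.pyGetD pri i 0)) (fun v => v) = some m ∧
      PySem.List.index? ((tmp :: rest).map (fun i => PySem.List.pyGetD pri i 0)) m = some k ∧
      k < rest.length + 1 := by
  set vals := (tmp :: rest).map (fun i => PySem.List.pyGetD pri i 0) with hv
  cases hm : PySem.List.max? vals (fun v => v) with
  | none => exact absurd ((PySem.List.max?_eq_none_iff vals _).1 hm) (by simp [hv])
  | some m =>
    have hmem : m ∈ vals := PySem.List.max?_mem hm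
    have hs : (PySem.List.index? vals m).isSome = true := (PySem.List.index?_isSome_iff vals m).2 hmem
    obtain ⟨k, hk⟩ := Option.isSome_iff_exists.1 hs
    obtain ⟨hklt, -, -⟩ := PySem.List.getElem_of_index?_eq_some hk
    exact ⟨m, k, rfl, hk, by simpa [hv] using hklt⟩

lemma orderB_cons_eq (fuel : Nat) (pri : List Int) (tmp : Int) (rest : List Int) (m : Int) (k : Nat)
    (hm : PySem.List.max? ((tmp :: rest).map (fun i => PySem.List.pyGetD pri i 0)) (fun v => v) = some m)
    (hk : PySem.List.index? ((tmp :: rest).map (fun i => PySem.List.pyGetD pri i 0)) m = some k) :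
    solutionOrderB (fuel + 1) pri (tmp :: rest) =
      PySem.List.pyGetD (tmp :: rest) (k : Int) 0 ::
        solutionOrderB fuel pri ((tmp :: rest).drop (k + 1) ++ (tmp :: rest).take k) := by
  simp only [solutionOrderB, hm, hk]

lemma phi_cons_eq (fuel : Nat) (pri : List Int) (tmp : Int) (rest : List Int) (m : Int) (k : Nat)
    (hm : PySem.List.max? ((tmp :: rest).map (fun i => PySem.List.pyGetD pri i 0)) (fun v => v) = some m)
    (hk : PySem.List.index? ((tmp :: rest).map (fun i => PySem.List.pyGetD pri i 0)) m = some k) :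
    solutionPhi (fuel + 1) pri (tmp :: rest) =
      (k + 1) + solutionPhi fuel pri ((tmp :: rest).drop (k + 1) ++ (tmp :: rest).take k) := by
  simp only [solutionPhi, hm, hk]

-- head already maximal: one pop
lemma orderB_pop (fuel : Nat) (pri : List Int) (tmp : Int) (rest : List Int)
    (hmax : ∀ x ∈ rest, ¬ PySem.List.pyGetD pri tmp 0 < PySem.List.pyGetD pri x 0) :
    solutionOrderB (fuel + 1) pri (tmp :: rest) = tmp :: solutionOrderB fuel pri rest ∧
      solutionPhi (fuel + 1) pri (tmp :: rest) = 1 + solutionPhi fuel pri rest := by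
  obtain ⟨m, k, hm, hk, hklt⟩ := solution_key pri tmp rest
  have hmt : m = PySem.List.pyGetD pri tmp 0 := by
    have hmem : m ∈ (tmp :: rest).map (fun i => PySem.List.pyGetD pri i 0) := PySem.List.max?_mem hm
    have hle : PySem.List.pyGetD pri tmp 0 ≤ m :=
      PySem.List.max?_isMax hm _ (by simp)
    rcases List.mem_map.1 hmem with ⟨x, hx, rfl⟩
    rcases List.mem_cons.1 hx with rfl | hx
    · rfl
    · exact le_antisymm (not_lt.1 (hmax x hx)) hle
  have hk0 : k = 0 := by
    have : PySem.List.index? ((tmp :: rest).map (fun i => PySem.List.pyGetD pri i 0)) m = some 0 := by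
      rw [List.map_cons, ← hmt]
      exact PySem.List.index?_cons_self m _
    rw [this] at hk; exact (Option.some_inj.1 hk).symm
  subst hk0
  constructor
  · rw [orderB_cons_eq fuel pri tmp rest m 0 hm hk]
    simp [PySem.List.pyGetD_zero_cons]
  · rw [phi_cons_eq fuel pri tmp rest m 0 hm hk]
    simp

-- head not maximal: a rotation, same execution order, one more iteration
lemma orderB_rotate (fuel : Nat) (pri : List Int) (tmp r0 : Int) (rs : List Int)
    (hx : ∃ x ∈ r0 :: rs, PySem.List.pyGetD pri tmp 0 < PySem.List.pyGetD pri x 0) :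
    solutionOrderB (fuel + 1) pri (tmp :: r0 :: rs) = solutionOrderB (fuel + 1) pri ((r0 :: rs) ++ [tmp]) ∧
      solutionPhi (fuel + 1) pri (tmp :: r0 :: rs) = solutionPhi (fuel + 1) pri ((r0 :: rs) ++ [tmp]) + 1 := by
  obtain ⟨m, k, hm, hk, hklt⟩ := solution_key pri tmp (r0 :: rs)
  have hmax := PySem.List.max?_isMax hm
  have htm : PySem.List.pyGetD pri tmp 0 < m := by
    obtain ⟨x, hxmem, hlt⟩ := hx
    exact lt_of_lt_of_le hlt (hmax _ (List.mem_map_of_mem (List.mem_cons_of_mem tmp hxmem)))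
  have hmrest : m ∈ (r0 :: rs).map (fun i => PySem.List.pyGetD pri i 0) := by
    have hmem := PySem.List.max?_mem hm
    rw [List.map_cons] at hmem
    rcases List.mem_cons.1 hmem with h | h
    · exact absurd h.symm (ne_of_lt htm)
    · exact h
  obtain ⟨k0, hk0⟩ : ∃ k0, PySem.List.index? ((r0 :: rs).map (fun i => PySem.List.pyGetD pri i 0)) m = some k0 :=
    Option.isSome_iff_exists.1 ((PySem.List.index?_isSome_iff _ _).2 hmrest)
  have hkk : k = k0 + 1 := by
    have hstep := PySem.List.index?_cons_of_ne (x := PySem.List.pyGetD pri tmp 0) (v := m)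
      ((r0 :: rs).map (fun i => PySem.List.pyGetD pri i 0)) (ne_of_lt htm)
    rw [List.map_cons, hstep, hk0] at hk
    simpa using hk.symm
  have hk0lt : k0 < rs.length + 1 := by
    obtain ⟨h, -, -⟩ := PySem.List.getElem_of_index?_eq_some hk0
    simpa using h
  have hm' : PySem.List.max? (((r0 :: rs) ++ [tmp]).map (fun i => PySem.List.pyGetD pri i 0)) (fun v => v) = some m := by
    obtain ⟨m', hm2⟩ : ∃ m', PySem.List.max? (((r0 :: rs) ++ [tmp]).map (fun i => PySem.List.pyGetD pri i 0)) (fun v => v) = some m' := by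
      cases hq : PySem.List.max? (((r0 :: rs) ++ [tmp]).map (fun i => PySem.List.pyGetD pri i 0)) (fun v => v) with
      | none => exact absurd ((PySem.List.max?_eq_none_iff _ _).1 hq) (by simp)
      | some m' => exact ⟨m', rfl⟩
    have h1 : m' ≤ m := by
      have hmem := PySem.List.max?_mem hm2
      rw [List.map_append] at hmem
      rcases List.mem_append.1 hmem with h | h
      · exact hmax _ (by rw [List.map_cons]; exact List.mem_cons_of_mem _ h)
      · simp at h; rw [h]; exact le_of_lt htm
    have h2 : m ≤ m' := PySem.List.max?_isMax hm2 _ (by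
      rw [List.map_append]; exact List.mem_append.2 (Or.inl hmrest))
    rw [hm2, le_antisymm h1 h2]
  have hk' : PySem.List.index? (((r0 :: rs) ++ [tmp]).map (fun i => PySem.List.pyGetD pri i 0)) m = some k0 := by
    rw [List.map_append, PySem.List.index?_append_of_mem _ hmrest]
    exact hk0
  subst hkk
  have e1 := orderB_cons_eq fuel pri tmp (r0 :: rs) m (k0 + 1) hm hk
  have e2 := orderB_cons_eq fuel pri r0 (rs ++ [tmp]) m k0 (by simpa using hm') (by simpa using hk')
  have p1 := phi_cons_eq fuel pri tmp (r0 :: rs) m (k0 + 1) hm hk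
  have p2 := phi_cons_eq fuel pri r0 (rs ++ [tmp]) m k0 (by simpa using hm') (by simpa using hk')
  have hhead : PySem.List.pyGetD (tmp :: r0 :: rs) ((k0 + 1 : Nat) : Int) 0 =
      PySem.List.pyGetD (r0 :: (rs ++ [tmp])) ((k0 : Nat) : Int) 0 := by
    rw [PySem.List.pyGetD_natCast, PySem.List.pyGetD_natCast, List.getD_cons_succ]
    have : r0 :: (rs ++ [tmp]) = (r0 :: rs) ++ [tmp] := by simp
    rw [this]
    exact (List.getD_append _ _ _ _ (by simpa using hk0lt)).symm
  have hsplice : (tmp :: r0 :: rs).drop (k0 + 1 + 1) ++ (tmp :: r0 :: rs).take (k0 + 1) =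
      (r0 :: (rs ++ [tmp])).drop (k0 + 1) ++ (r0 :: (rs ++ [tmp])).take k0 := by
    have hc : r0 :: (rs ++ [tmp]) = (r0 :: rs) ++ [tmp] := by simp
    rw [hc, List.drop_append, List.take_append]
    have h1 : k0 + 1 - (r0 :: rs).length = 0 := by simp; omega
    have h2 : k0 - (r0 :: rs).length = 0 := by simp; omega
    rw [h1, h2]
    simp [List.drop_succ_cons, List.take_succ_cons]
  constructor
  · rw [show (r0 :: rs) ++ [tmp] = r0 :: (rs ++ [tmp]) by simp]
    rw [e1, e2, hhead, hsplice]
  · rw [show (r0 :: rs) ++ [tmp] = r0 :: (rs ++ [tmp]) by simp]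
    rw [p1, p2, hsplice]
    omega

-- A's loop only reads pri at live queue indices; agreeing priority lists give equal runs
lemma loopA_congr (fuel : Nat) (pri1 pri2 qu ans : List Int)
    (hnn : ∀ x ∈ qu, 0 ≤ x)
    (h : ∀ x ∈ qu, PySem.List.pyGetD pri1 x 0 = PySem.List.pyGetD pri2 x 0) :
    solutionLoopA fuel pri1 qu ans = solutionLoopA fuel pri2 qu ans := by
  induction fuel generalizing pri1 pri2 qu ans with
  | zero => rfl
  | succ fuel ih =>
    cases qu with
    | nil => rfl
    | cons tmp rest =>
      have hcond : rest.any (fun x => decide (PySem.List.pyGetD pri1 tmp 0 < PySem.List.pyGetD pri1 x 0)) =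
          rest.any (fun x => decide (PySem.List.pyGetD pri2 tmp 0 < PySem.List.pyGetD pri2 x 0)) := by
        apply PySem.List.any_congr_mem
        intro x hx
        rw [h tmp (List.mem_cons_self), h x (List.mem_cons_of_mem _ hx)]
      simp only [solutionLoopA, hcond]
      split
      · apply ih
        · intro x hx; rcases List.mem_append.1 hx with hx | hx
          · exact hnn x (List.mem_cons_of_mem _ hx)
          · simp at hx; subst hx; exact hnn x List.mem_cons_self
        · intro x hx; rcases List.mem_append.1 hx with hx | hx
          · exact h x (List.mem_cons_of_mem _ hx)
          · simp at hx; subst hx; exact h x List.mem_cons_self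
      · apply ih
        · intro x hx; exact hnn x (List.mem_cons_of_mem _ hx)
        · intro x hx
          have hxn : (0:Int) ≤ x := hnn x (List.mem_cons_of_mem _ hx)
          have htn : (0:Int) ≤ tmp := hnn tmp List.mem_cons_self
          rw [PySem.List.pySetD_of_nonneg _ _ htn, PySem.List.pySetD_of_nonneg _ _ htn,
            PySem.List.pyGetD_of_nonneg _ _ hxn, PySem.List.pyGetD_of_nonneg _ _ hxn]
          by_cases hxt : x.toNat = tmp.toNat
          · have hzero : ∀ (l : List Int), (l.set tmp.toNat 0).getD tmp.toNat 0 = 0 := by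
              intro l
              unfold List.getD
              rw [List.getElem?_set]
              split
              · split <;> rfl
              · simp at *
            rw [hxt, hzero, hzero]
          · unfold List.getD
            rw [List.getElem?_set, List.getElem?_set]
            simp only [if_neg (show ¬ tmp.toNat = x.toNat from fun hh => hxt hh.symm)]
            have := h x (List.mem_cons_of_mem _ hx)
            rw [PySem.List.pyGetD_of_nonneg _ _ hxn, PySem.List.pyGetD_of_nonneg _ _ hxn] at this
            unfold List.getD at this
            exact this

-- main invariant: A's loop produces exactly B's execution order
lemma loopA_eq_orderB (fuel : Nat) (pri qu ans : List Int)
    (hfuel : solutionPhi qu.length pri qu ≤ fuel)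
    (hnn : ∀ x ∈ qu, 0 ≤ x) (hnd : qu.Nodup) :
    solutionLoopA fuel pri qu ans = ans ++ solutionOrderB qu.length pri qu := by
  induction fuel generalizing pri qu ans with
  | zero =>
    cases qu with
    | nil => simp [solutionLoopA, solutionOrderB]
    | cons tmp rest =>
      exfalso
      obtain ⟨m, k, hm, hk, -⟩ := solution_key pri tmp rest
      have := phi_cons_eq rest.length pri tmp rest m k hm hk
      simp only [List.length_cons] at hfuel
      omega
  | succ fuel ih =>
    cases qu with
    | nil => simp [solutionLoopA, solutionOrderB]
    | cons tmp rest =>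
      by_cases hc : rest.any (fun x => decide (PySem.List.pyGetD pri tmp 0 < PySem.List.pyGetD pri x 0)) = true
      · -- rotation step
        have hx : ∃ x ∈ rest, PySem.List.pyGetD pri tmp 0 < PySem.List.pyGetD pri x 0 := by
          simpa using List.any_eq_true.1 hc
        cases rest with
        | nil => simp at hx
        | cons r0 rs =>
          obtain ⟨hB, hP⟩ := orderB_rotate (rs.length + 1) pri tmp r0 rs hx
          simp only [solutionLoopA]
          rw [if_pos hc]
          simp only [List.length_cons, List.length_append, List.length_nil, Nat.zero_add,
            Nat.add_zero] at hfuel hB hP ⊢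
          rw [ih pri ((r0 :: rs) ++ [tmp]) ans ?_ ?_ ?_]
          · simp only [List.length_cons, List.length_append, List.length_nil, Nat.zero_add,
              Nat.add_zero]
            rw [hB]
          · simp only [List.length_cons, List.length_append, List.length_nil, Nat.zero_add,
              Nat.add_zero]
            omega
          · intro x hx2; rcases List.mem_append.1 hx2 with hx2 | hx2
            · exact hnn x (List.mem_cons_of_mem _ hx2)
            · simp at hx2; subst hx2; exact hnn x List.mem_cons_self
          · have hperm : (tmp :: (r0 :: rs)).Perm ((r0 :: rs) ++ [tmp]) :=
              (List.perm_append_singleton tmp (r0 :: rs)).symm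
            exact hperm.nodup hnd
      · -- pop step
        have hmax : ∀ x ∈ rest, ¬ PySem.List.pyGetD pri tmp 0 < PySem.List.pyGetD pri x 0 := by
          intro x hx hlt
          exact hc (List.any_eq_true.2 ⟨x, hx, by simpa using hlt⟩)
        obtain ⟨hB, hP⟩ := orderB_pop rest.length pri tmp rest hmax
        simp only [solutionLoopA]
        rw [if_neg hc]
        have htmp : tmp ∉ rest := (List.nodup_cons.1 hnd).1
        have htn : (0:Int) ≤ tmp := hnn tmp List.mem_cons_self
        rw [loopA_congr fuel (PySem.List.pySetD pri tmp 0) pri rest (ans ++ [tmp])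
          (fun x hx => hnn x (List.mem_cons_of_mem _ hx)) ?_]
        · rw [ih pri rest (ans ++ [tmp]) ?_ (fun x hx => hnn x (List.mem_cons_of_mem _ hx)) (List.nodup_cons.1 hnd).2]
          · simp only [List.length_cons, hB, List.append_assoc, List.singleton_append]
          · simp only [List.length_cons] at hfuel
            omega
        · intro x hx
          have hxn : (0:Int) ≤ x := hnn x (List.mem_cons_of_mem _ hx)
          have hxt : x ≠ tmp := fun hh => htmp (hh ▸ hx)
          rw [PySem.List.pySetD_of_nonneg _ _ htn, PySem.List.pyGetD_of_nonneg _ _ hxn,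
            PySem.List.pyGetD_of_nonneg _ _ hxn]
          unfold List.getD
          rw [List.getElem?_set]
          have hne : ¬ tmp.toNat = x.toNat := fun hh => hxt (by omega)
          rw [if_neg hne]

-- A's loop needs at most n^2 iterations from a queue of length n
lemma phi_le (fuel : Nat) (pri qu : List Int) (h : qu.length ≤ fuel) :
    solutionPhi fuel pri qu ≤ qu.length * qu.length := by
  induction fuel generalizing qu with
  | zero =>
    cases qu with
    | nil => simp [solutionPhi]
    | cons tmp rest => simp at h
  | succ fuel ih =>
    cases qu with
    | nil => simp [solutionPhi]
    | cons tmp rest =>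
      obtain ⟨m, k, hm, hk, hklt⟩ := solution_key pri tmp rest
      rw [phi_cons_eq fuel pri tmp rest m k hm hk]
      set s := (tmp :: rest).drop (k + 1) ++ (tmp :: rest).take k with hs
      have hslen : s.length = rest.length := by
        simp only [hs, List.length_append, List.length_drop, List.length_take, List.length_cons]
        omega
      have hrec := ih s (by rw [hslen]; simpa using Nat.lt_succ_iff.1 (by simpa using h))
      rw [hslen] at hrec
      simp only [List.length_cons]
      nlinarith [hklt, hrec]

-- ===== VERDICT (by name: the statement is the Claim_ definition above) =====
theorem solution_spec : Claim_equal_solution := by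
  intro pri loc _ _
  unfold Spec_solution
  simp only [solution, solution_alt]
  have hnn : ∀ x ∈ PySem.List.pyRange 0 (pri.length : Int) 1, (0:Int) ≤ x :=
    fun x hx => (PySem.List.mem_pyRange_one.1 hx).1
  have hnd := PySem.List.nodup_pyRange_one 0 (pri.length : Int)
  have hlen : (PySem.List.pyRange 0 (pri.length : Int) 1).length = pri.length := by
    rw [PySem.List.length_pyRange_one]; simp
  have hphi : solutionPhi (PySem.List.pyRange 0 (pri.length : Int) 1).length pri
      (PySem.List.pyRange 0 (pri.length : Int) 1) ≤ pri.length * pri.length + 1 := by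
    have hb := phi_le (PySem.List.pyRange 0 (pri.length : Int) 1).length pri
      (PySem.List.pyRange 0 (pri.length : Int) 1) le_rfl
    rw [hlen] at hb
    rw [hlen]
    omega
  rw [loopA_eq_orderB (pri.length * pri.length + 1) pri
    (PySem.List.pyRange 0 (pri.length : Int) 1) [] hphi hnn hnd]
  rw [List.nil_append]
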